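-- pv_equiv track=rewrite | github.com/noemimotolese/esercizio1 | esercizio1_verifica.py | competizione_con_meno_giudici
-- ===== SOURCE A (Python) =====
-- def competizione_con_meno_giudici(tupla_competizioni):
--     min=100
--     chefMin=[]
--     piattoMin=[]
--     punteggioMin=[]
--     for chef, piatto, punteggio, giudici in tupla_competizioni:
--         if giudici<min:
--             min=giudici
--             chefMin=[chef]
--             piattoMin=[piatto]
--             punteggioMin=[punteggio]
--         elif giudici==min:
--             chefMin.append(chef)
--             piattoMin.append(piatto)
--             punteggioMin.append(punteggio)
--     return(chefMin, piattoMin, punteggioMin, min)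
-- ===== SOURCE B (Python) =====
-- def competizione_con_meno_giudici(tupla_competizioni):
--     m = min([100] + [g for _, _, _, g in tupla_competizioni])
--     chefMin = [c for c, _, _, g in tupla_competizioni if g == m]
--     piattoMin = [p for _, p, _, g in tupla_competizioni if g == m]
--     punteggioMin = [s for _, _, s, g in tupla_competizioni if g == m]
--     return (chefMin, piattoMin, punteggioMin, m)
-- ===== Notes on version B (the rewrite author's own statement) =====
-- stated objective: simpler
-- what changed: A's single interleaved pass with mutable reset-or-append state is split into a min computation over the giudici values (with the same 100 cap) followed by order-preserving filters selecting the matching chefs, dishes and scores.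
import Mathlib
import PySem

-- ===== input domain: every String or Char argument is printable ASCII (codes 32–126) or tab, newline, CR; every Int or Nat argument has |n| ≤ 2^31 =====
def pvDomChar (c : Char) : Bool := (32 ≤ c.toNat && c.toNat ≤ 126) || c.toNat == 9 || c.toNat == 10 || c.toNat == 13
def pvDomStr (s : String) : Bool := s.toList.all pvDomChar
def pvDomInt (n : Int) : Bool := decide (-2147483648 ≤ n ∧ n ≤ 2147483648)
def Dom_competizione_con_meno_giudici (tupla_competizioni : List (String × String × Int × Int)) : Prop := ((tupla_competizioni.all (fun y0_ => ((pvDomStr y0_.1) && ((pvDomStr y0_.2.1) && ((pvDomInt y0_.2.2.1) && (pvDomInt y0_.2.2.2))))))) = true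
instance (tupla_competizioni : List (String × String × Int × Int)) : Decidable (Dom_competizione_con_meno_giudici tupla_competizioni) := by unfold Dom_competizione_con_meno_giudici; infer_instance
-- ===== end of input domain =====

-- B replaces A's single interleaved reset-or-append pass by a min computation followed by filters (objective: simpler).


-- ===== PORT A =====
-- one pass: state (chefMin, piattoMin, punteggioMin, min), reset on strictly smaller, append on equal
def pvStepA (st : List String × List String × List Int × Int)
    (t : String × String × Int × Int) : List String × List String × List Int × Int :=
  match st, t with
  | (chefMin, piattoMin, punteggioMin, m), (chef, piatto, punteggio, giudici) =>
    if giudici < m then ([chef], [piatto], [punteggio], giudici)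
    else if giudici == m then
      (chefMin ++ [chef], piattoMin ++ [piatto], punteggioMin ++ [punteggio], m)
    else (chefMin, piattoMin, punteggioMin, m)

def competizione_con_meno_giudici (tupla_competizioni : List (String × String × Int × Int)) : List String × List String × List Int × Int :=
  tupla_competizioni.foldl pvStepA ([], [], [], (100 : Int))

-- ===== PORT B =====
def competizione_con_meno_giudici_alt (tupla_competizioni : List (String × String × Int × Int)) : List String × List String × List Int × Int :=
  let m := (tupla_competizioni.map (fun t => t.2.2.2)).foldl min (100 : Int)
  ((tupla_competizioni.filter (fun t => t.2.2.2 == m)).map (fun t => t.1),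
   (tupla_competizioni.filter (fun t => t.2.2.2 == m)).map (fun t => t.2.1),
   (tupla_competizioni.filter (fun t => t.2.2.2 == m)).map (fun t => t.2.2.1),
   m)

-- ===== PRECONDITION & SPEC =====
def Spec_competizione_con_meno_giudici (tupla_competizioni : List (String × String × Int × Int)) (out : List String × List String × List Int × Int) : Prop := out = competizione_con_meno_giudici_alt tupla_competizioni
instance (tupla_competizioni : List (String × String × Int × Int)) (out : List String × List String × List Int × Int) : Decidable (Spec_competizione_con_meno_giudici tupla_competizioni out) := by unfold Spec_competizione_con_meno_giudici; infer_instance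

-- ===== CLAIM (what is proved, stated in full; the proofs are below) =====
def Claim_equal_competizione_con_meno_giudici : Prop := ∀ (tupla_competizioni : List (String × String × Int × Int)), Dom_competizione_con_meno_giudici tupla_competizioni → Spec_competizione_con_meno_giudici tupla_competizioni (competizione_con_meno_giudici tupla_competizioni)

-- ===== LEMMAS AND PROOFS =====

-- fold of min never exceeds its initial value
theorem pvFoldlMin_le (l : List Int) (m : Int) : l.foldl min m ≤ m := by
  induction l generalizing m with
  | nil => simp
  | cons a l ih => exact le_trans (ih _) (min_le_left _ _)

-- A's loop from an arbitrary state: the final min is the fold of min over the remaining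
-- giudici, the lists are the matching elements of the remainder, prefixed by the carried
-- lists exactly when no strictly smaller giudici appears (i.e. the final min equals m).
theorem pvLoopA_spec (xs : List (String × String × Int × Int))
    (cs ps : List String) (ss : List Int) (m : Int) :
    xs.foldl pvStepA (cs, ps, ss, m) =
      (let m' := (xs.map (fun t => t.2.2.2)).foldl min m
       ((if m' = m then cs else []) ++ (xs.filter (fun t => t.2.2.2 == m')).map (fun t => t.1),
        (if m' = m then ps else []) ++ (xs.filter (fun t => t.2.2.2 == m')).map (fun t => t.2.1),
        (if m' = m then ss else []) ++ (xs.filter (fun t => t.2.2.2 == m')).map (fun t => t.2.2.1),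
        m')) := by
  induction xs generalizing cs ps ss m with
  | nil => simp
  | cons x xs ih =>
    obtain ⟨c, p, s, g⟩ := x
    have hle : ∀ m0 : Int, (xs.map (fun t => t.2.2.2)).foldl min m0 ≤ m0 :=
      fun m0 => pvFoldlMin_le _ _
    simp only [List.foldl_cons, List.map_cons, List.filter_cons]
    by_cases hlt : g < m
    · have hm : min m g = g := by omega
      have hstep : pvStepA (cs, ps, ss, m) (c, p, s, g) = ([c], [p], [s], g) := by
        simp [pvStepA, hlt]
      rw [hstep, ih]
      simp only [hm]
      have hne : ¬ ((xs.map (fun t => t.2.2.2)).foldl min g = m) := by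
        have := hle g; omega
      have hgm : ¬ (g = m) := by omega
      by_cases heq : (xs.map (fun t => t.2.2.2)).foldl min g = g
      · simp [heq, hgm]
      · have hb : ¬ (g = (xs.map (fun t => t.2.2.2)).foldl min g) := fun h => heq h.symm
        simp [heq, hne, hb]
    · by_cases heq : g = m
      · have hm : min m g = m := by omega
        have hstep : pvStepA (cs, ps, ss, m) (c, p, s, g) = (cs ++ [c], ps ++ [p], ss ++ [s], m) := by
          simp [pvStepA, heq]
        rw [hstep, ih]
        simp only [hm]
        by_cases h2 : (xs.map (fun t => t.2.2.2)).foldl min m = m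
        · simp [h2, heq]
        · have hb : ¬ (g = (xs.map (fun t => t.2.2.2)).foldl min m) := by
            rw [heq]; exact fun h => h2 h.symm
          simp [h2, hb]
      · have hm : min m g = m := by omega
        have hstep : pvStepA (cs, ps, ss, m) (c, p, s, g) = (cs, ps, ss, m) := by
          simp [pvStepA, hlt, heq]
        rw [hstep, ih]
        simp only [hm]
        have hb : ¬ (g = (xs.map (fun t => t.2.2.2)).foldl min m) := by
          have := hle m; omega
        simp [hb]

-- ===== VERDICT (by name: the statement is the Claim_ definition above) =====
theorem competizione_con_meno_giudici_spec : Claim_equal_competizione_con_meno_giudici := by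
  intro xs _
  show _ = _
  unfold competizione_con_meno_giudici competizione_con_meno_giudici_alt
  rw [pvLoopA_spec]
  simp [ite_self]
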